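-- pv_equiv track=rewrite | github.com/cmkxak/algorithms | 프로그래머스/lv2/72411. 메뉴 리뉴얼/메뉴 리뉴얼.py | get_max_orders
-- ===== SOURCE A (Python) =====
-- def get_max_orders(candidates):
--     order = {}
--     answer = []
--     for c in candidates:
--         order[c] = order.get(c, 0) + 1
--     if order:
--         for k, v in order.items():
--             if v == max(order.values()) and v >= 2:
--                 answer.append(''.join(k))
--         return answer
-- ===== SOURCE B (Python) =====
-- def get_max_orders(candidates):
--     freq = {}
--     for c in candidates:
--         freq[c] = freq.get(c, 0) + 1
--     if not freq:
--         return None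
--     index = {}
--     for k, v in freq.items():
--         index.setdefault(v, []).append(''.join(k))
--     m = max(index)
--     return index[m] if m >= 2 else []
-- ===== Notes on version B (the rewrite author's own statement) =====
-- stated objective: alternative
-- what changed: B replaces A's selection loop, which rescans max(order.values()) for every frequency item, by an inverted count->combos index built in one pass over the frequency items followed by a single max-key bucket lookup.
import Mathlib
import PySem

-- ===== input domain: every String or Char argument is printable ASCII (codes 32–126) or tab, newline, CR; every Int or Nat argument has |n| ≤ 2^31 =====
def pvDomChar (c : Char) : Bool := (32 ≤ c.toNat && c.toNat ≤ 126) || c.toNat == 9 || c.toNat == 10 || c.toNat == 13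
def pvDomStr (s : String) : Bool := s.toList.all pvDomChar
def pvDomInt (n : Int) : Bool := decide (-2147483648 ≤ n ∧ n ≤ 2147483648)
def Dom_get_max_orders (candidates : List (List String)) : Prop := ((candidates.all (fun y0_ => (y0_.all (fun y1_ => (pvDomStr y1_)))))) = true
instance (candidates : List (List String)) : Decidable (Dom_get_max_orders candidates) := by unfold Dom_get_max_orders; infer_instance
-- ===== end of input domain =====

-- B replaces A's per-item rescan of max(order.values()) by an inverted count→combos index
-- built in one pass, followed by a single max-key bucket lookup (objective: alternative).

-- ===== PORT A =====
def get_max_orders (candidates : List (List String)) : Option (List String) :=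
  let order := candidates.foldl (fun d c => d.insert c (d.getD c 0 + 1)) (PySem.Dict.empty : PySem.Dict (List String) Int)
  if order.items ≠ [] then
    some (order.items.foldl (fun answer kv =>
      if decide (some kv.2 = PySem.List.max? order.values (fun v => v)) && decide (2 ≤ kv.2) then
        answer ++ [PySem.Str.join "" kv.1]
      else answer) [])
  else none

-- ===== PORT B =====
-- B's inverted-index loop: index.setdefault(v, []).append(''.join(k)) over freq.items()
def pvIndex (its : List (List String × Int)) : PySem.Dict Int (List String) :=
  its.foldl (fun d kv => d.insert kv.2 (d.getD kv.2 [] ++ [PySem.Str.join "" kv.1]))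
    PySem.Dict.empty

def get_max_orders_alt (candidates : List (List String)) : Option (List String) :=
  let freq := candidates.foldl (fun d c => d.insert c (d.getD c 0 + 1)) (PySem.Dict.empty : PySem.Dict (List String) Int)
  if freq.items = [] then none
  else
    match PySem.List.max? (pvIndex freq.items).keys (fun v => v) with
    | some m => some (if 2 ≤ m then (pvIndex freq.items).getD m [] else [])
    | none => none   -- unreachable: the index is nonempty whenever freq is

-- ===== PRECONDITION & SPEC =====
def Spec_get_max_orders (candidates : List (List String)) (out : Option (List String)) : Prop := out = get_max_orders_alt candidates
instance (candidates : List (List String)) (out : Option (List String)) : Decidable (Spec_get_max_orders candidates out) := by unfold Spec_get_max_orders; infer_instance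

-- ===== CLAIM (what is proved, stated in full; the proofs are below) =====
def Claim_equal_get_max_orders : Prop := ∀ (candidates : List (List String)), Dom_get_max_orders candidates → Spec_get_max_orders candidates (get_max_orders candidates)

-- ===== LEMMAS AND PROOFS =====

-- the inverted index of B, looked up at v, is the filter of items with count v (joined)
lemma index_getD (its : List (List String × Int)) (d : PySem.Dict Int (List String)) (v : Int) :
    (its.foldl (fun d kv =>
      d.insert kv.2 (d.getD kv.2 [] ++ [PySem.Str.join "" kv.1])) d).getD v []
      = d.getD v [] ++ (its.filter (fun kv => kv.2 == v)).map (fun kv => PySem.Str.join "" kv.1) := by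
  induction its generalizing d with
  | nil => simp
  | cons kv rest ih =>
    simp only [List.foldl_cons, ih, List.filter_cons]
    rw [PySem.Dict.getD_insert]
    by_cases h : kv.2 = v
    · simp [h]
    · simp [h, Ne.symm h]

-- every key of B's index is one of the counts, and conversely
lemma mem_index_keys (its : List (List String × Int)) (v : Int) :
    v ∈ (pvIndex its).keys ↔ v ∈ its.map (·.2) := by
  unfold pvIndex
  rw [PySem.Dict.keys_foldl_insert_key its (·.2)
        (fun d kv => d.getD kv.2 [] ++ [PySem.Str.join "" kv.1]) PySem.Dict.empty]
  rw [PySem.Dict.keys_empty, PySem.Set.mem_update]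
  simp

-- the maxima of B's index keys and of A's value list coincide
lemma max_keys_eq (its : List (List String × Int)) (h : its ≠ []) :
    PySem.List.max? (pvIndex its).keys (fun v => v)
      = PySem.List.max? (its.map (·.2)) (fun v => v) := by
  have hvne : its.map (·.2) ≠ [] := by simpa using h
  cases hv : PySem.List.max? (its.map (·.2)) (fun v => (v : Int)) with
  | none => exact absurd ((PySem.List.max?_eq_none_iff _ _).1 hv) hvne
  | some m =>
    have hmKeys : m ∈ (pvIndex its).keys := (mem_index_keys its m).2 (PySem.List.max?_mem hv)
    cases hk : PySem.List.max? (pvIndex its).keys (fun v => (v : Int)) with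
    | none =>
      rw [PySem.List.max?_eq_none_iff] at hk
      rw [hk] at hmKeys
      simp at hmKeys
    | some m' =>
      have h1 : m' ≤ m := PySem.List.max?_isMax hv _ ((mem_index_keys its m').1 (PySem.List.max?_mem hk))
      have h2 : m ≤ m' := PySem.List.max?_isMax hk _ hmKeys
      exact congrArg some (le_antisymm h1 h2)

-- ===== VERDICT (by name: the statement is the Claim_ definition above) =====
theorem get_max_orders_spec : Claim_equal_get_max_orders := by
  intro candidates _
  unfold Spec_get_max_orders get_max_orders get_max_orders_alt
  set cnt := candidates.foldl (fun d c => d.insert c (d.getD c 0 + 1)) (PySem.Dict.empty : PySem.Dict (List String) Int) with hcnt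
  by_cases hne : cnt.items = []
  · simp [hne]
  · rw [if_pos hne, if_neg hne]
    have hvals : cnt.values = cnt.items.map (·.2) := rfl
    have hvne : cnt.items.map (·.2) ≠ [] := by simpa using hne
    cases hv : PySem.List.max? (cnt.items.map (·.2)) (fun v => (v : Int)) with
    | none => exact absurd ((PySem.List.max?_eq_none_iff _ _).1 hv) hvne
    | some m =>
      rw [max_keys_eq cnt.items hne, hv]
      simp only []
      rw [PySem.List.foldl_append_if
        (fun kv : List String × Int =>
          decide (some kv.2 = PySem.List.max? cnt.values (fun v => v)) && decide (2 ≤ kv.2))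
        (fun kv : List String × Int => PySem.Str.join "" kv.1)]
      have hidx : (pvIndex cnt.items).getD m []
          = (cnt.items.filter (fun kv => kv.2 == m)).map (fun kv => PySem.Str.join "" kv.1) := by
        unfold pvIndex
        rw [index_getD]
        simp
      rw [hidx]
      simp only [List.nil_append, hvals, hv]
      by_cases hm : 2 ≤ m
      · simp only [hm, if_true, Option.some.injEq]
        congr 1
        apply List.filter_congr
        intro kv _
        by_cases hkv : kv.2 = m
        · simp [hkv, hm]
        · simp [hkv]
      · simp only [hm, if_false, Option.some.injEq]
        rw [List.filter_eq_nil_iff.2]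
        · rfl
        · intro kv _
          simp only [Bool.and_eq_true, decide_eq_true_eq, not_and]
          intro he; omega
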